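-- pv_equiv track=rewrite | github.com/pbucci/TranscriptCleaning | get_transcript_links/gen_links.py | gen_dates
-- ===== SOURCE A (Python) =====
-- def my_str(x):
-- 	ret = str(x)
-- 	if (len(ret) == 1):
-- 		ret = "0" + ret
-- 	return ret
--
-- outlist = [4,6,9,11]
--
-- def gen_dates(first_year,last_year):
-- 	ret = []
-- 	for i in range(first_year,last_year):
-- 		for j in range(1,13):
-- 			for k in range(1,32):
-- 				if ((k == 31) and (j in outlist)) or ((k > 28) and (j == 2)):
-- 					pass
-- 				else:
-- 					ret.append(("-".join( (my_str(x) for x in [i,j,k]) )))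
-- 	return ret
-- ===== SOURCE B (Python) =====
-- def my_str(x):
--     ret = str(x)
--     if (len(ret) == 1):
--         ret = "0" + ret
--     return ret
--
-- month_days = [31, 28, 31, 30, 31, 30, 31, 31, 30, 31, 30, 31]
--
-- def gen_dates(first_year, last_year):
--     return ["-".join(my_str(x) for x in [i, j, k])
--             for i in range(first_year, last_year)
--             for j in range(1, 13)
--             for k in range(1, month_days[j - 1] + 1)]
-- ===== Notes on version B (the rewrite author's own statement) =====
-- stated objective: idiomatic
-- what changed: Replaces A's fixed 1..31 day loop with a skip branch by a single list comprehension whose inner day bound is read from a precomputed month-length table (Feb=28, matching A), eliminating the filter branch and the accumulator loop.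
import Mathlib
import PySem

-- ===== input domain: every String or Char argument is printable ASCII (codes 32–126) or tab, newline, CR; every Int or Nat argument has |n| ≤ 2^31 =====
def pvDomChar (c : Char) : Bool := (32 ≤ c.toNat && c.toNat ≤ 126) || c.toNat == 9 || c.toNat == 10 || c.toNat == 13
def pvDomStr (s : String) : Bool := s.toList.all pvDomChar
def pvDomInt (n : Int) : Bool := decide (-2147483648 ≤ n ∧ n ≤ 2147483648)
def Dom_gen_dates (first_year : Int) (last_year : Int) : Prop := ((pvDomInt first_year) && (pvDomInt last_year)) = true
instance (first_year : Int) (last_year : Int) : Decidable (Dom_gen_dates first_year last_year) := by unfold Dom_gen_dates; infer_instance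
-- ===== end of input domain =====

-- B replaces A's 1..31 day loop + skip branch by a comprehension over a month-length table (idiomatic; same output).

-- ===== PORT A =====
def my_strL (x : Int) : String :=
  let ret := PySem.Int.toStr x
  if PySem.Str.len ret = 1 then "0" ++ ret else ret

def outlistL : List Int := [4, 6, 9, 11]

def gen_dates (first_year : Int) (last_year : Int) : List String :=
  (PySem.List.pyRange first_year last_year 1).foldl (fun ret i =>
    (PySem.List.pyRange 1 13 1).foldl (fun ret j =>
      (PySem.List.pyRange 1 32 1).foldl (fun ret k =>
        if (k = 31 ∧ j ∈ outlistL) ∨ (k > 28 ∧ j = 2) then ret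
        else ret ++ [PySem.Str.join "-" [my_strL i, my_strL j, my_strL k]]) ret) ret) []

-- ===== PORT B =====
def month_daysL : List Int := [31, 28, 31, 30, 31, 30, 31, 31, 30, 31, 30, 31]

def gen_dates_alt (first_year : Int) (last_year : Int) : List String :=
  (PySem.List.pyRange first_year last_year 1).flatMap (fun i =>
    (PySem.List.pyRange 1 13 1).flatMap (fun j =>
      (PySem.List.pyRange 1 (PySem.List.pyGetD month_daysL (j - 1) 0 + 1) 1).map (fun k =>
        PySem.Str.join "-" [my_strL i, my_strL j, my_strL k])))

-- ===== PRECONDITION & SPEC =====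
def Spec_gen_dates (first_year : Int) (last_year : Int) (out : List String) : Prop := out = gen_dates_alt first_year last_year
instance (first_year : Int) (last_year : Int) (out : List String) : Decidable (Spec_gen_dates first_year last_year out) := by unfold Spec_gen_dates; infer_instance

-- ===== CLAIM (what is proved, stated in full; the proofs are below) =====
def Claim_equal_gen_dates : Prop := ∀ (first_year : Int) (last_year : Int), Dom_gen_dates first_year last_year → Spec_gen_dates first_year last_year (gen_dates first_year last_year)

-- ===== LEMMAS AND PROOFS =====

-- A's skip branch, read as a filter of the 1..31 day range, keeps exactly the 1..month_days[j-1] prefix (12 concrete cases).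
theorem filter_days_eq : ∀ j ∈ (PySem.List.pyRange 1 13 1),
    (PySem.List.pyRange 1 32 1).filter
      (fun k => decide (¬ ((k = 31 ∧ j ∈ outlistL) ∨ (k > 28 ∧ j = 2))))
      = PySem.List.pyRange 1 (PySem.List.pyGetD month_daysL (j - 1) 0 + 1) 1 := by decide

-- A's innermost loop appends exactly the filtered day list (per year i, month j).
theorem inner_day_eq (i j : Int) (acc : List String) :
    (PySem.List.pyRange 1 32 1).foldl (fun ret k =>
        if (k = 31 ∧ j ∈ outlistL) ∨ (k > 28 ∧ j = 2) then ret
        else ret ++ [PySem.Str.join "-" [my_strL i, my_strL j, my_strL k]]) acc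
      = acc ++ ((PySem.List.pyRange 1 32 1).filter
          (fun k => decide (¬ ((k = 31 ∧ j ∈ outlistL) ∨ (k > 28 ∧ j = 2))))).map
          (fun k => PySem.Str.join "-" [my_strL i, my_strL j, my_strL k]) := by
  induction (PySem.List.pyRange 1 32 1) generalizing acc with
  | nil => simp
  | cons x xs ih =>
    by_cases h : (x = 31 ∧ j ∈ outlistL) ∨ (x > 28 ∧ j = 2)
    · rw [List.foldl_cons, if_pos h, ih, List.filter_cons, if_neg (by simp only [decide_eq_true_eq]; exact not_not_intro h)]
    · rw [List.foldl_cons, if_neg h, ih, List.filter_cons, if_pos (by simp only [decide_eq_true_eq]; exact h)]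
      simp

theorem gen_dates_spec : Claim_equal_gen_dates := by
  intro fy ly _
  unfold Spec_gen_dates gen_dates gen_dates_alt
  simp only [inner_day_eq, PySem.List.foldl_append_eq_flatMap, List.nil_append]
  have hmonth : ∀ i : Int,
      (PySem.List.pyRange 1 13 1).flatMap (fun j =>
        ((PySem.List.pyRange 1 32 1).filter
          (fun k => decide (¬ ((k = 31 ∧ j ∈ outlistL) ∨ (k > 28 ∧ j = 2))))).map
          (fun k => PySem.Str.join "-" [my_strL i, my_strL j, my_strL k]))
      = (PySem.List.pyRange 1 13 1).flatMap (fun j =>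
        (PySem.List.pyRange 1 (PySem.List.pyGetD month_daysL (j - 1) 0 + 1) 1).map
          (fun k => PySem.Str.join "-" [my_strL i, my_strL j, my_strL k])) := by
    intro i
    rw [List.flatMap_def, List.flatMap_def]
    exact congrArg List.flatten (List.map_congr_left (fun j hj => by rw [filter_days_eq j hj]))
  simp only [hmonth]
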